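-- pv_equiv track=rewrite | github.com/imzii/Meta100 | Texting.py | problem_type
-- ===== SOURCE A (Python) =====
-- def problem_type(errors):
--     type_dict = {
--         "듣기": list(range(1, 18)),
--         "글의 목적": [18],
--         "글의 분위기": [19],
--         "대의 파악": [20, 22, 23, 24],
--         "함의 추론": [21],
--         "도표 이해": [25],
--         "내용 일치 / 불일치": [26],
--         "실용문 일치": [27, 28],
--         "어법성 판단": [29],
--         "단어 쓰임 판단": [30],
--         "빈칸 추론": list(range(31, 35)),
--         "무관한 문장 고르기": [35],
--         "문단 순서 맞히기": [36, 37],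
--         "주어진 문장 넣기": [38, 39],
--         "요약문 완성": [40],
--         "기본 장문 독해": [41, 42],
--         "복합 문단 독해": list(range(43, 46))
--     }
--
--     result = []
--     for t, nums in type_dict.items():
--         temp = [str(n) for n in errors if n in nums]
--         if temp:
--             result.append(", ".join(temp) + f"({t})")
--
--     return ", ".join(result)
-- ===== SOURCE B (Python) =====
-- _TYPES = [
--     "듣기", "글의 목적", "글의 분위기", "대의 파악", "함의 추론", "도표 이해",
--     "내용 일치 / 불일치", "실용문 일치", "어법성 판단", "단어 쓰임 판단",
--     "빈칸 추론", "무관한 문장 고르기", "문단 순서 맞히기", "주어진 문장 넣기",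
--     "요약문 완성", "기본 장문 독해", "복합 문단 독해",
-- ]
--
--
-- def _category(n):
--     if 1 <= n <= 17:
--         return "듣기"
--     if n == 18:
--         return "글의 목적"
--     if n == 19:
--         return "글의 분위기"
--     if n == 21:
--         return "함의 추론"
--     if 20 <= n <= 24:
--         return "대의 파악"
--     if n == 25:
--         return "도표 이해"
--     if n == 26:
--         return "내용 일치 / 불일치"
--     if 27 <= n <= 28:
--         return "실용문 일치"
--     if n == 29:
--         return "어법성 판단"
--     if n == 30:
--         return "단어 쓰임 판단"
--     if 31 <= n <= 34:
--         return "빈칸 추론"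
--     if n == 35:
--         return "무관한 문장 고르기"
--     if 36 <= n <= 37:
--         return "문단 순서 맞히기"
--     if 38 <= n <= 39:
--         return "주어진 문장 넣기"
--     if n == 40:
--         return "요약문 완성"
--     if 41 <= n <= 42:
--         return "기본 장문 독해"
--     if 43 <= n <= 45:
--         return "복합 문단 독해"
--     return None
--
--
-- def problem_type(errors):
--     buckets = {t: [] for t in _TYPES}
--     for n in errors:
--         t = _category(n)
--         if t is not None:
--             buckets[t].append(str(n))
--     parts = []
--     for t in _TYPES:
--         b = buckets[t]
--         if b:
--             parts.append(", ".join(b) + f"({t})")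
--     return ", ".join(parts)
-- ===== Notes on version B (the rewrite author's own statement) =====
-- stated objective: alternative
-- what changed: Replaces the 17 per-category scans of errors (membership test against each category's number list) by a single pass over errors that classifies each number with an arithmetic range classifier and appends it to per-category buckets, then renders the buckets in category order.
import Mathlib
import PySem

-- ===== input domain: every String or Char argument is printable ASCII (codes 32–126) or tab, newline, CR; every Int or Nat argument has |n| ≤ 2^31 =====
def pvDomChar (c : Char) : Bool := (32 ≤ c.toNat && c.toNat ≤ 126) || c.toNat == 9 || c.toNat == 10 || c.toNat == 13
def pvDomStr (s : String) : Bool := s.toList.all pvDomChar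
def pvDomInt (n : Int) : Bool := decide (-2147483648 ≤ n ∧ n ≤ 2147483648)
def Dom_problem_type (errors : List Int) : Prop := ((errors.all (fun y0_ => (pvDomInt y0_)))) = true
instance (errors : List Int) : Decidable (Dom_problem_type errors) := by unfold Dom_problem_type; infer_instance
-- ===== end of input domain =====

-- B replaces A's 17 per-category filter passes over errors by a single classifying pass into ordered buckets; same output, no speed claim.

-- ===== PORT A =====
def pvTypeDict : List (String × List Int) :=
  [("듣기", PySem.List.pyRange 1 18 1),
   ("글의 목적", [18]),
   ("글의 분위기", [19]),
   ("대의 파악", [20, 22, 23, 24]),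
   ("함의 추론", [21]),
   ("도표 이해", [25]),
   ("내용 일치 / 불일치", [26]),
   ("실용문 일치", [27, 28]),
   ("어법성 판단", [29]),
   ("단어 쓰임 판단", [30]),
   ("빈칸 추론", PySem.List.pyRange 31 35 1),
   ("무관한 문장 고르기", [35]),
   ("문단 순서 맞히기", [36, 37]),
   ("주어진 문장 넣기", [38, 39]),
   ("요약문 완성", [40]),
   ("기본 장문 독해", [41, 42]),
   ("복합 문단 독해", PySem.List.pyRange 43 46 1)]

def problem_type (errors : List Int) : String :=
  PySem.Str.join ", " (pvTypeDict.foldl (fun result p =>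
    let temp := (errors.filter (fun n => p.2.contains n)).map PySem.Int.toStr
    if temp.isEmpty then result else result ++ [PySem.Str.join ", " temp ++ "(" ++ p.1 ++ ")"]) [])

-- ===== PORT B =====
def pvTypes : List String :=
  ["듣기", "글의 목적", "글의 분위기", "대의 파악", "함의 추론", "도표 이해",
   "내용 일치 / 불일치", "실용문 일치", "어법성 판단", "단어 쓰임 판단",
   "빈칸 추론", "무관한 문장 고르기", "문단 순서 맞히기", "주어진 문장 넣기",
   "요약문 완성", "기본 장문 독해", "복합 문단 독해"]

def pvCategory (n : Int) : Option String :=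
  if 1 ≤ n ∧ n ≤ 17 then some "듣기"
  else if n = 18 then some "글의 목적"
  else if n = 19 then some "글의 분위기"
  else if n = 21 then some "함의 추론"
  else if 20 ≤ n ∧ n ≤ 24 then some "대의 파악"
  else if n = 25 then some "도표 이해"
  else if n = 26 then some "내용 일치 / 불일치"
  else if 27 ≤ n ∧ n ≤ 28 then some "실용문 일치"
  else if n = 29 then some "어법성 판단"
  else if n = 30 then some "단어 쓰임 판단"
  else if 31 ≤ n ∧ n ≤ 34 then some "빈칸 추론"
  else if n = 35 then some "무관한 문장 고르기"
  else if 36 ≤ n ∧ n ≤ 37 then some "문단 순서 맞히기"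
  else if 38 ≤ n ∧ n ≤ 39 then some "주어진 문장 넣기"
  else if n = 40 then some "요약문 완성"
  else if 41 ≤ n ∧ n ≤ 42 then some "기본 장문 독해"
  else if 43 ≤ n ∧ n ≤ 45 then some "복합 문단 독해"
  else none

def pvBucketsInit : PySem.Dict String (List String) :=
  pvTypes.foldl (fun d t => d.insert t []) PySem.Dict.empty

def pvBucketsStep (d : PySem.Dict String (List String)) (n : Int) : PySem.Dict String (List String) :=
  match pvCategory n with
  | some t => d.modify t [] (fun b => b ++ [PySem.Int.toStr n])
  | none => d

def problem_type_alt (errors : List Int) : String :=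
  PySem.Str.join ", " (pvTypes.foldl (fun parts t =>
    let b := (errors.foldl pvBucketsStep pvBucketsInit).getD t []
    if b.isEmpty then parts else parts ++ [PySem.Str.join ", " b ++ "(" ++ t ++ ")"]) [])

-- ===== PRECONDITION & SPEC =====
def Spec_problem_type (errors : List Int) (out : String) : Prop := out = problem_type_alt errors
instance (errors : List Int) (out : String) : Decidable (Spec_problem_type errors out) := by unfold Spec_problem_type; infer_instance

-- ===== CLAIM (what is proved, stated in full; the proofs are below) =====
def Claim_equal_problem_type : Prop := ∀ (errors : List Int), Dom_problem_type errors → Spec_problem_type errors (problem_type errors)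

-- ===== LEMMAS AND PROOFS =====

-- final bucket content: getD after the classifying fold = initial ++ the category's entries in errors order
lemma pv_bucket_fold (errors : List Int) (d : PySem.Dict String (List String)) (t : String) :
    (errors.foldl pvBucketsStep d).getD t [] =
      d.getD t [] ++ (errors.filter (fun n => pvCategory n == some t)).map PySem.Int.toStr := by
  induction errors generalizing d with
  | nil => simp
  | cons n ns ih =>
    simp only [List.foldl_cons, List.filter_cons]
    cases hc : pvCategory n with
    | none =>
      simp [pvBucketsStep, hc, ih]
    | some t' =>
      rw [show pvBucketsStep d n = d.modify t' [] (fun b => b ++ [PySem.Int.toStr n]) by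
        simp [pvBucketsStep, hc]]
      rw [ih, PySem.Dict.getD_modify]
      by_cases h : t = t'
      · subst h; simp
      · simp [h, Ne.symm h]

-- every question number in the table lies in 1..45
lemma pv_typeDict_bounds : ∀ q ∈ pvTypeDict, ∀ m ∈ q.2, 1 ≤ m ∧ m ≤ 45 := by decide

lemma pv_cat_out (n : Int) (h : n < 1 ∨ 45 < n) : pvCategory n = none := by
  unfold pvCategory
  rw [if_neg (by omega), if_neg (by omega), if_neg (by omega), if_neg (by omega),
    if_neg (by omega), if_neg (by omega), if_neg (by omega), if_neg (by omega),
    if_neg (by omega), if_neg (by omega), if_neg (by omega), if_neg (by omega),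
    if_neg (by omega), if_neg (by omega), if_neg (by omega), if_neg (by omega),
    if_neg (by omega)]

lemma pv_contains_false {n : Int} {l : List Int} (hl : ∀ m ∈ l, 1 ≤ m ∧ m ≤ 45)
    (h : n < 1 ∨ 45 < n) : l.contains n = false := by
  induction l with
  | nil => rfl
  | cons m ms ih =>
    simp only [List.contains_cons, Bool.or_eq_false_iff]
    refine ⟨by rw [beq_eq_false_iff_ne]; have := hl m (List.mem_cons_self); omega,
      ih (fun m hm => hl m (List.mem_cons_of_mem _ hm))⟩

def pvRange45 : List Int := PySem.List.pyRange 1 46 1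

-- the classifier agrees with membership in each category's number list
lemma pv_cat_table : ∀ q ∈ pvTypeDict, ∀ m ∈ pvRange45,
    (pvCategory m == some q.1) = q.2.contains m := by decide

lemma pv_cat_spec (p : String × List Int) (hp : p ∈ pvTypeDict) (n : Int) :
    (pvCategory n == some p.1) = p.2.contains n := by
  by_cases h : 1 ≤ n ∧ n ≤ 45
  · refine pv_cat_table p hp n ?_
    rw [show pvRange45 = ([1,2,3,4,5,6,7,8,9,10,11,12,13,14,15,16,17,18,19,20,21,22,23,24,
      25,26,27,28,29,30,31,32,33,34,35,36,37,38,39,40,41,42,43,44,45] : List Int) from by decide]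
    simp only [List.mem_cons, List.not_mem_nil, or_false]
    omega
  · rw [pv_cat_out n (by omega), pv_contains_false (pv_typeDict_bounds p hp) (by omega)]; rfl

lemma pv_getD_foldl_insert_nil (l : List String) (d : PySem.Dict String (List String))
    (h : ∀ s, d.getD s [] = []) (s : String) :
    (l.foldl (fun d t => d.insert t ([] : List String)) d).getD s [] = [] := by
  induction l generalizing d with
  | nil => exact h s
  | cons t ts ih =>
    refine ih _ (fun s' => ?_)
    rw [PySem.Dict.getD_insert]
    split_ifs with hst
    · rfl
    · exact h s'

lemma pv_init_getD (t : String) : pvBucketsInit.getD t [] = [] :=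
  pv_getD_foldl_insert_nil pvTypes PySem.Dict.empty (fun s => by simp) t

-- ===== VERDICT (by name: the statement is the Claim_ definition above) =====
theorem problem_type_spec : Claim_equal_problem_type := by
  intro errors _
  unfold Spec_problem_type problem_type problem_type_alt
  congr 1
  rw [show pvTypes = pvTypeDict.map Prod.fst from rfl, List.foldl_map]
  refine (PySem.List.foldl_congr_mem _ _ _ _ ?_).symm
  intro acc p hp
  show (if ((errors.foldl pvBucketsStep pvBucketsInit).getD p.1 []).isEmpty then acc
      else acc ++ [PySem.Str.join ", " ((errors.foldl pvBucketsStep pvBucketsInit).getD p.1 []) ++ "(" ++ p.1 ++ ")"]) = _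
  rw [pv_bucket_fold, pv_init_getD p.1,
    List.nil_append,
    List.filter_congr (fun n _ => pv_cat_spec p hp n)]
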